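-- pv_equiv track=rewrite | github.com/bfurgason-lgtm/sf-ux-orchestrator-v2 | integrations/figma/file_manager.py | channel_y_offset
-- ===== SOURCE A (Python) =====
-- CHANNEL_HEIGHTS = {
--     "web":   629,
--     "sms":   844,
--     "email": 280,
-- }
--
-- CHANNEL_GAP = 60   # vertical gap between channel rows
--
-- def channel_y_offset(channels: list, channel: str, active_channels: list = None) -> float:
--     """Vertical Y position for a channel row, stacking only active channels."""
--     ordered = [ch for ch in channels if active_channels is None or ch in active_channels]
--     y = 100
--     for ch in ordered:
--         if ch == channel:
--             return y
--         y += CHANNEL_HEIGHTS.get(ch, 629) + CHANNEL_GAP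
--     return y
-- ===== SOURCE B (Python) =====
-- CHANNEL_HEIGHTS = {
--     "web":   629,
--     "sms":   844,
--     "email": 280,
-- }
--
-- CHANNEL_GAP = 60
--
--
-- def channel_y_offset(channels: list, channel: str, active_channels: list = None) -> float:
--     """Vertical Y position for a channel row: locate the row, then sum the rows above it."""
--     if active_channels is None:
--         ordered = list(channels)
--     else:
--         ordered = [ch for ch in channels if ch in active_channels]
--     try:
--         prefix = ordered[:ordered.index(channel)]
--     except ValueError:
--         prefix = ordered
--     return 100 + sum(CHANNEL_HEIGHTS.get(ch, 629) + CHANNEL_GAP for ch in prefix)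
-- ===== Notes on version B (the rewrite author's own statement) =====
-- stated objective: alternative
-- what changed: Replaced the early-terminating accumulator loop with a two-phase locate-then-sum: find the channel's first index in the filtered list (whole list if absent) and sum the heights of the prefix before it.
import Mathlib
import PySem

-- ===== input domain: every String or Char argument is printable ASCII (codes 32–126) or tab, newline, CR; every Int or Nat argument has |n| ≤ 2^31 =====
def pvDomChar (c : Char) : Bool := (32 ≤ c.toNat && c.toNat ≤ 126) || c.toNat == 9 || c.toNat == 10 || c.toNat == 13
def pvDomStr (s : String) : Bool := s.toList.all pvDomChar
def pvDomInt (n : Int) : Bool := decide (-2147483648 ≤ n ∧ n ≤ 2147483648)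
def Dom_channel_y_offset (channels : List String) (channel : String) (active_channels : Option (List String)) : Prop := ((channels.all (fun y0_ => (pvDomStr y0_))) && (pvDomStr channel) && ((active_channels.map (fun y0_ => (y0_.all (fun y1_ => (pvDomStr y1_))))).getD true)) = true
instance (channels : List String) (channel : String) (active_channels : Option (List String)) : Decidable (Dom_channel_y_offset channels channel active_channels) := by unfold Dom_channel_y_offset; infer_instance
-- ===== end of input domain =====

-- B replaces A's early-terminating accumulator loop by a locate-then-sum two-phase
-- computation (same cost; objective: alternative decomposition).

-- CHANNEL_HEIGHTS / CHANNEL_GAP, shared module constants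
def pvHeights : PySem.Dict String Int :=
  PySem.Dict.ofList [("web", 629), ("sms", 844), ("email", 280)]

def pvGap : Int := 60

-- ===== PORT A =====
-- the for-loop with early return, as structural recursion over (ordered, y)
def pvLoopA (channel : String) : List String → Int → Int
  | [], y => y
  | ch :: rest, y =>
    if ch = channel then y
    else pvLoopA channel rest (y + (pvHeights.getD ch 629 + pvGap))

def channel_y_offset (channels : List String) (channel : String) (active_channels : Option (List String)) : Int :=
  let ordered := channels.filter (fun ch =>
    match active_channels with
    | none => true
    | some a => decide (ch ∈ a))
  pvLoopA channel ordered 100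

-- ===== PORT B =====
def channel_y_offset_alt (channels : List String) (channel : String) (active_channels : Option (List String)) : Int :=
  let ordered :=
    match active_channels with
    | none => channels
    | some a => channels.filter (fun ch => decide (ch ∈ a))
  let pre :=
    match PySem.List.index? ordered channel with
    | some i => PySem.List.slice ordered none (some (i : Int))
    | none => ordered
  100 + (pre.map (fun ch => pvHeights.getD ch 629 + pvGap)).sum

-- ===== PRECONDITION & SPEC =====
def Spec_channel_y_offset (channels : List String) (channel : String) (active_channels : Option (List String)) (out : Int) : Prop := out = channel_y_offset_alt channels channel active_channels
instance (channels : List String) (channel : String) (active_channels : Option (List String)) (out : Int) : Decidable (Spec_channel_y_offset channels channel active_channels out) := by unfold Spec_channel_y_offset; infer_instance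

-- ===== CLAIM (what is proved, stated in full; the proofs are below) =====
def Claim_equal_channel_y_offset : Prop := ∀ (channels : List String) (channel : String) (active_channels : Option (List String)), Dom_channel_y_offset channels channel active_channels → Spec_channel_y_offset channels channel active_channels (channel_y_offset channels channel active_channels)

-- ===== LEMMAS AND PROOFS =====

-- the loop of A computes y plus the height-sum of the prefix before channel's first occurrence
theorem pvLoopA_eq (channel : String) (l : List String) (y : Int) :
    pvLoopA channel l y =
      y + (((match PySem.List.index? l channel with
             | some i => l.take i
             | none => l).map (fun ch => pvHeights.getD ch 629 + pvGap)).sum) := by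
  induction l generalizing y with
  | nil => simp [pvLoopA, PySem.List.index?]
  | cons ch rest ih =>
    by_cases h : ch = channel
    · subst h
      rw [PySem.List.index?_cons_self]
      simp [pvLoopA]
    · rw [PySem.List.index?_cons_of_ne rest h]
      simp only [pvLoopA, if_neg h, ih]
      cases PySem.List.index? rest channel with
      | none => simp; ring
      | some i => simp [List.take_succ_cons]; ring

-- both ports agree on the same filtered list
theorem pvKey (channel : String) (l : List String) :
    pvLoopA channel l 100 =
      100 + (((match PySem.List.index? l channel with
               | some i => PySem.List.slice l none (some (i : Int))
               | none => l).map (fun ch => pvHeights.getD ch 629 + pvGap)).sum) := by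
  rw [pvLoopA_eq]
  cases h : PySem.List.index? l channel with
  | none => simp
  | some i => simp [PySem.List.slice_to_natCast]

-- ===== VERDICT (by name: the statement is the Claim_ definition above) =====
theorem channel_y_offset_spec : Claim_equal_channel_y_offset := by
  intro channels channel active_channels _
  unfold Spec_channel_y_offset channel_y_offset channel_y_offset_alt
  cases active_channels with
  | none =>
      have hfilt : channels.filter (fun ch =>
          match (none : Option (List String)) with
          | none => true
          | some a => decide (ch ∈ a)) = channels := by simp
      rw [hfilt]
      exact pvKey channel channels
  | some a =>
      exact pvKey channel (channels.filter (fun ch => decide (ch ∈ a)))
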